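-- pv_equiv track=rewrite | github.com/a-guler/edu-advisor | Major_Recommend/src/modeling/interest_quiz/interests_cleaning.py | make_counter
-- ===== SOURCE A (Python) =====
-- from collections import Counter
--
-- def make_counter(question, i, fields_dict):
--
--     fields = []
--     for major in question[i]:
--         for field, majors_set in fields_dict.items():
--             if major in majors_set:
--                 fields.append(field)
--             else:
--                 continue
--     return Counter(fields)
-- ===== SOURCE B (Python) =====
-- from collections import Counter
--
-- def make_counter(question, i, fields_dict):
--     # reverse index: major -> list of fields (in fields_dict order) whose set contains it
--     index = {}
--     for field, majors_set in fields_dict.items():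
--         for major in majors_set:
--             index.setdefault(major, []).append(field)
--     c = Counter()
--     for major in question[i]:
--         c.update(index.get(major, ()))
--     return c
-- ===== Notes on version B (the rewrite author's own statement) =====
-- stated objective: alternative
-- what changed: Replaces the per-major rescan of fields_dict by a reverse index built once (major -> fields whose set contains it), so each quiz answer is a dictionary lookup whose hits are fed straight into a Counter instead of scanning every field's set.
import Mathlib
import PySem

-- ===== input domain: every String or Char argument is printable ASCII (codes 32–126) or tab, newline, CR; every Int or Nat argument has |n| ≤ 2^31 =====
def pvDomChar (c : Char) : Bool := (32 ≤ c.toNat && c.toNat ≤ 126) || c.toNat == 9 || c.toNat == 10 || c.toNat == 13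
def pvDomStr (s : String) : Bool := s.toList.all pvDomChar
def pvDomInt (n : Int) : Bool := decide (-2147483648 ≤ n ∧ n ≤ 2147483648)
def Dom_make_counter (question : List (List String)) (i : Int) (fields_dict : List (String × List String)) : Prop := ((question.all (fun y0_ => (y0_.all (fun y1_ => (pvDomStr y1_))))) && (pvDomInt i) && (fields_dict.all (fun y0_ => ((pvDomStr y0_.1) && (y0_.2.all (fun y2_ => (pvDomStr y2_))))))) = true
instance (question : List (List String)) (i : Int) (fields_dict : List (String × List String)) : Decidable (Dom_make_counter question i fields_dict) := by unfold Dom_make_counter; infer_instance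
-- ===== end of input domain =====

-- B builds a reverse index (major -> fields containing it) once, then counts by dictionary
-- lookup instead of rescanning fields_dict per major: a different decomposition of the count.


-- ===== PORT A =====
-- fields_dict is a Python dict (duplicate keys collapse, last value at first position): PySem.Dict.ofList;
-- its set values are used only through membership, which is order/duplicate-insensitive on the raw list.
def make_counter (question : List (List String)) (i : Int) (fields_dict : List (String × List String)) : List (String × Int) :=
  match PySem.List.pyGet? question i with
  | none => []   -- question[i] raises IndexError: excluded by Pre_
  | some majors =>
    let items := (PySem.Dict.ofList fields_dict).items
    let fields := majors.foldl (fun acc major =>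
      items.foldl (fun acc p => if major ∈ p.2 then acc ++ [p.1] else acc) acc) []
    (PySem.Dict.counter fields).items

-- ===== PORT B =====
-- the set value is iterated: PySem.Set.ofList p.2 (order-insensitive here: per major, each field
-- is appended at most once, in fields_dict order, so the index entry does not depend on set order)
def make_counter_alt (question : List (List String)) (i : Int) (fields_dict : List (String × List String)) : List (String × Int) :=
  match PySem.List.pyGet? question i with
  | none => []   -- question[i] raises IndexError: excluded by Pre_
  | some majors =>
    let index : PySem.Dict String (List String) :=
      (PySem.Dict.ofList fields_dict).items.foldl (fun ix p =>
        (PySem.Set.ofList p.2).foldl (fun ix m => ix.modify m [] (· ++ [p.1])) ix) PySem.Dict.empty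
    let c : PySem.Dict String Int :=
      majors.foldl (fun c major =>
        (index.getD major []).foldl (fun c f => c.modify f 0 (· + 1)) c) PySem.Dict.empty
    c.items

-- ===== PRECONDITION & SPEC =====
-- A raises IndexError iff i is out of range for question (negative Python indexing allowed)
def Pre_make_counter (question : List (List String)) (i : Int) (fields_dict : List (String × List String)) : Prop :=
  PySem.Raise.InRange question.length i
instance (question : List (List String)) (i : Int) (fields_dict : List (String × List String)) : Decidable (Pre_make_counter question i fields_dict) := by unfold Pre_make_counter; infer_instance

def pvWitness_make_counter : List (List String) × Int × (List (String × List String)) :=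
  ([["a", "b"], ["c"]], 0, [("f1", ["a", "c"]), ("f2", ["b", "a"])])

def Spec_make_counter (question : List (List String)) (i : Int) (fields_dict : List (String × List String)) (out : List (String × Int)) : Prop := out = make_counter_alt question i fields_dict
instance (question : List (List String)) (i : Int) (fields_dict : List (String × List String)) (out : List (String × Int)) : Decidable (Spec_make_counter question i fields_dict out) := by unfold Spec_make_counter; infer_instance

-- ===== CLAIM (what is proved, stated in full; the proofs are below) =====
def Claim_equal_make_counter : Prop := ∀ (question : List (List String)) (i : Int) (fields_dict : List (String × List String)), Dom_make_counter question i fields_dict → Pre_make_counter question i fields_dict → Spec_make_counter question i fields_dict (make_counter question i fields_dict)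

-- ===== LEMMAS AND PROOFS =====

-- the reverse index looked up at `major` is exactly the fields whose set contains `major`, in order
lemma index_getD (l : List (String × List String)) (d : PySem.Dict String (List String)) (major : String) :
    (l.foldl (fun ix p => (PySem.Set.ofList p.2).foldl (fun ix m => ix.modify m [] (· ++ [p.1])) ix) d).getD major []
      = d.getD major [] ++ (l.filter (fun p => decide (major ∈ p.2))).map (·.1) := by
  induction l generalizing d with
  | nil => simp
  | cons p t ih =>
    simp only [List.foldl_cons, ih, List.filter_cons]
    have hset : ((PySem.Set.ofList p.2).foldl (fun ix m => ix.modify m [] (· ++ [p.1])) d).getD major []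
        = d.getD major [] ++ (if major ∈ p.2 then [p.1] else []) := by
      have h1 : ((PySem.Set.ofList p.2).map (fun m => (m, p.1))).foldl
          (fun (d : PySem.Dict String (List String)) q => d.modify q.1 [] (· ++ [q.2])) d
          = (PySem.Set.ofList p.2).foldl (fun ix m => ix.modify m [] (· ++ [p.1])) d := by
        rw [List.foldl_map]
      rw [← h1, PySem.Dict.getD_foldl_modify_append]
      congr 1
      rw [List.filter_map]
      have h2 : (PySem.Set.ofList p.2).filter ((fun q => q.1 == major) ∘ (fun m => (m, p.1)))
          = (PySem.Set.ofList p.2).filter (· == major) := rfl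
      rw [h2, List.filter_beq]
      have hnd := PySem.Set.nodup_ofList (xs := p.2) (α := String)
      by_cases hm : major ∈ p.2
      · have hmem : major ∈ PySem.Set.ofList p.2 := (PySem.Set.mem_ofList p.2 major).2 hm
        rw [List.count_eq_one_of_mem hnd hmem]
        simp [hm]
      · have hmem : major ∉ PySem.Set.ofList p.2 := fun h => hm ((PySem.Set.mem_ofList p.2 major).1 h)
        rw [List.count_eq_zero_of_not_mem hmem]
        simp [hm]
    rw [hset]
    by_cases hm : major ∈ p.2 <;> simp [hm]

-- folding over a flatMap is the nested fold
lemma foldl_flatMap_eq {α β γ : Type} (l : List α) (g : α → List β) (f : γ → β → γ) (init : γ) :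
    (l.flatMap g).foldl f init = l.foldl (fun acc x => (g x).foldl f acc) init := by
  induction l generalizing init with
  | nil => simp
  | cons x t ih => simp [List.foldl_append, ih]

theorem make_counter_spec : Claim_equal_make_counter := by
  intro question i fields_dict _hdom hpre
  unfold Spec_make_counter make_counter make_counter_alt
  have hsome : ∃ majors, PySem.List.pyGet? question i = some majors := by
    rcases h : PySem.List.pyGet? question i with _ | majors
    · exact absurd ((PySem.List.pyGet?_eq_none_iff question i).1 h) (not_not_intro hpre)
    · exact ⟨majors, rfl⟩
  rcases hsome with ⟨majors, hget⟩
  rw [hget]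
  simp only
  set items := (PySem.Dict.ofList fields_dict).items with hitems
  set g : String → List String :=
    fun major => (items.filter (fun p => decide (major ∈ p.2))).map (·.1) with hg
  -- A's fields list is majors.flatMap g
  have hA : majors.foldl (fun acc major =>
      items.foldl (fun acc p => if major ∈ p.2 then acc ++ [p.1] else acc) acc) []
      = majors.flatMap g := by
    have := PySem.List.foldl_congr_mem'
      (l := majors) (init := ([] : List String))
      (f := fun acc major => items.foldl (fun acc p => if major ∈ p.2 then acc ++ [p.1] else acc) acc)
      (g := fun acc major => acc ++ g major)
      (by
        intro major _ acc
        show items.foldl (fun acc p => if major ∈ p.2 then acc ++ [p.1] else acc) acc = acc ++ g major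
        exact PySem.List.foldl_append_ite (l := items) (acc := acc)
          (p := fun p => major ∈ p.2) (f := fun p => p.1))
    rw [this, PySem.List.foldl_append_eq_flatMap]
    simp
  rw [hA]
  -- B's lookups are g, so B's counting loop is the counter of majors.flatMap g
  have hB : majors.foldl (fun c major =>
      (((PySem.Dict.ofList fields_dict).items.foldl (fun ix p =>
          (PySem.Set.ofList p.2).foldl (fun ix m => ix.modify m [] (· ++ [p.1])) ix)
          PySem.Dict.empty).getD major []).foldl
        (fun (c : PySem.Dict String Int) f => c.modify f 0 (· + 1)) c) PySem.Dict.empty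
      = PySem.Dict.counter (majors.flatMap g) := by
    have hlk : ∀ major, ((PySem.Dict.ofList fields_dict).items.foldl (fun ix p =>
        (PySem.Set.ofList p.2).foldl (fun ix m => ix.modify m [] (· ++ [p.1])) ix)
        PySem.Dict.empty).getD major [] = g major := by
      intro major
      rw [index_getD]
      simp [hg, hitems]
    rw [PySem.Dict.counter_eq_foldl, foldl_flatMap_eq]
    have hcongr := PySem.List.foldl_congr_mem' (l := majors)
      (init := (PySem.Dict.empty : PySem.Dict String Int))
      (f := fun c major => (((PySem.Dict.ofList fields_dict).items.foldl (fun ix p =>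
          (PySem.Set.ofList p.2).foldl (fun ix m => ix.modify m [] (· ++ [p.1])) ix)
          PySem.Dict.empty).getD major []).foldl
        (fun (c : PySem.Dict String Int) f => c.modify f 0 (· + 1)) c)
      (g := fun c major => (g major).foldl
        (fun (c : PySem.Dict String Int) f => c.modify f 0 (· + 1)) c)
      (by intro major _ c; simp only [hlk major])
    exact hcongr
  rw [hB]

-- ===== VERDICT (by name: the statement is the Claim_ definition above) =====
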